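-- pv_equiv track=rewrite | github.com/cgvvxx/PS | ps/스택, 큐/049_P_디스크컨트롤러.py | condition_sort
-- ===== SOURCE A (Python) =====
-- def condition_sort(jobs, t):
--     under_t = []
--     over_t = []
--     for job in jobs:
--         if job[0] <= t:
--             under_t.append(job)
--         else:
--             over_t.append(job)
--
--     under_t.sort(key=lambda x: x[1])
--     over_t.sort(key=lambda x: (x[0], x[1]))
--
--     return under_t + over_t
-- ===== SOURCE B (Python) =====
-- def condition_sort(jobs, t):
--     return sorted(jobs, key=lambda x: (0, x[1], 0) if x[0] <= t else (1, x[0], x[1]))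
-- ===== Notes on version B (the rewrite author's own statement) =====
-- stated objective: simpler
-- what changed: Replaces the partition loop and two separate stable sorts with one stable sort of the whole list under a composite key whose leading 0/1 flag puts the under-threshold group first.
import Mathlib
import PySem

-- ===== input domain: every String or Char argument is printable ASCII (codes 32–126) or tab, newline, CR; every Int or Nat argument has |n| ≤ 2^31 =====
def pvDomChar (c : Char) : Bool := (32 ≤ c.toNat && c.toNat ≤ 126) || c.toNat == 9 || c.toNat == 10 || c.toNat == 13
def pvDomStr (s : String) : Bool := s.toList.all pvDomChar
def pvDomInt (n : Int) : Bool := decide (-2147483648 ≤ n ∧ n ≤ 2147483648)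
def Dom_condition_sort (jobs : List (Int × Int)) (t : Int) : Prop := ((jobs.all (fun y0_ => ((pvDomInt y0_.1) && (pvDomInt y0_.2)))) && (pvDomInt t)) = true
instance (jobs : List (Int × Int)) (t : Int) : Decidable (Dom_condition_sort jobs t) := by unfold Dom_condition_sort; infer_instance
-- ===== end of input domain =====

-- B replaces A's partition loop and two stable sorts by ONE stable sort under a
-- composite (flag, primary, secondary) key; objective: simpler.


-- ===== PORT A =====
def condition_sort (jobs : List (Int × Int)) (t : Int) : List (Int × Int) :=
  -- the partition loop: append each job to under_t or over_t
  let uo := jobs.foldl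
    (fun (acc : List (Int × Int) × List (Int × Int)) job =>
      if job.1 ≤ t then (acc.1 ++ [job], acc.2) else (acc.1, acc.2 ++ [job]))
    ([], [])
  -- under_t.sort(key=lambda x: x[1]); over_t.sort(key=lambda x: (x[0], x[1]))
  PySem.List.sorted uo.1 (fun x => x.2) false
    ++ PySem.List.sorted2 uo.2 (fun x => x.1) (fun x => x.2) false

-- ===== PORT B =====
-- the composite key (0, x[1], 0) if x[0] <= t else (1, x[0], x[1]); lexicographic
-- comparison of the 3-tuple is the lexicographic order on Int ×ₗ (Int ×ₗ Int)
def pvKey_condition_sort (t : Int) (x : Int × Int) : Int ×ₗ (Int ×ₗ Int) :=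
  if x.1 ≤ t then toLex (0, toLex (x.2, 0)) else toLex (1, toLex (x.1, x.2))

def condition_sort_alt (jobs : List (Int × Int)) (t : Int) : List (Int × Int) :=
  PySem.List.sorted jobs (pvKey_condition_sort t) false

-- ===== PRECONDITION & SPEC =====
def Spec_condition_sort (jobs : List (Int × Int)) (t : Int) (out : List (Int × Int)) : Prop := out = condition_sort_alt jobs t
instance (jobs : List (Int × Int)) (t : Int) (out : List (Int × Int)) : Decidable (Spec_condition_sort jobs t out) := by unfold Spec_condition_sort; infer_instance

-- ===== CLAIM (what is proved, stated in full; the proofs are below) =====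
def Claim_equal_condition_sort : Prop := ∀ (jobs : List (Int × Int)) (t : Int), Dom_condition_sort jobs t → Spec_condition_sort jobs t (condition_sort jobs t)

-- ===== LEMMAS AND PROOFS =====

theorem pv_insertBy_congr {α : Type} (b₁ b₂ : α → α → Bool) (x : α) (ys : List α)
    (h : ∀ y ∈ ys, b₁ x y = b₂ x y) :
    PySem.List.insertBy b₁ x ys = PySem.List.insertBy b₂ x ys := by
  induction ys with
  | nil => rfl
  | cons y ys ih =>
    simp only [PySem.List.insertBy, h y (by simp)]
    by_cases hb : b₂ x y = true
    · simp [hb]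
    · simp only [Bool.not_eq_true] at hb
      simp [hb, ih (fun z hz => h z (by simp [hz]))]

theorem pv_insertBy_append_all_true {α : Type} (b : α → α → Bool) (x : α) (L R : List α)
    (h : ∀ y ∈ R, b x y = true) :
    PySem.List.insertBy b x (L ++ R) = PySem.List.insertBy b x L ++ R := by
  induction L with
  | nil =>
    cases R with
    | nil => rfl
    | cons r rs => simp [PySem.List.insertBy, h r (by simp)]
  | cons z L ih =>
    by_cases hb : b x z = true
    · simp [PySem.List.insertBy, hb]
    · simp only [Bool.not_eq_true] at hb
      simp [PySem.List.insertBy, hb, ih]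

theorem pv_insertBy_append_all_false {α : Type} (b : α → α → Bool) (x : α) (L R : List α)
    (h : ∀ y ∈ L, b x y = false) :
    PySem.List.insertBy b x (L ++ R) = L ++ PySem.List.insertBy b x R := by
  induction L with
  | nil => rfl
  | cons z L ih =>
    simp [PySem.List.insertBy, h z (by simp), ih (fun y hy => h y (by simp [hy]))]

-- key comparisons, case by case
theorem pv_key_uu {t : Int} {x y : Int × Int} (hx : x.1 ≤ t) (hy : y.1 ≤ t) :
    decide (pvKey_condition_sort t x < pvKey_condition_sort t y) = decide (x.2 < y.2) := by
  simp only [pvKey_condition_sort, if_pos hx, if_pos hy]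
  by_cases h : x.2 < y.2 <;> simp [h, Prod.Lex.lt_iff]

theorem pv_key_uo {t : Int} {x y : Int × Int} (hx : x.1 ≤ t) (hy : ¬ y.1 ≤ t) :
    decide (pvKey_condition_sort t x < pvKey_condition_sort t y) = true := by
  simp only [pvKey_condition_sort, if_pos hx, if_neg hy]
  simp [Prod.Lex.lt_iff]

theorem pv_key_ou {t : Int} {x y : Int × Int} (hx : ¬ x.1 ≤ t) (hy : y.1 ≤ t) :
    decide (pvKey_condition_sort t x < pvKey_condition_sort t y) = false := by
  simp only [pvKey_condition_sort, if_neg hx, if_pos hy]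
  simp [Prod.Lex.lt_iff]

theorem pv_key_oo {t : Int} {x y : Int × Int} (hx : ¬ x.1 ≤ t) (hy : ¬ y.1 ≤ t) :
    decide (pvKey_condition_sort t x < pvKey_condition_sort t y)
      = (decide (x.1 < y.1) || !decide (y.1 < x.1) && decide (x.2 < y.2)) := by
  simp only [pvKey_condition_sort, if_neg hx, if_neg hy]
  by_cases h1 : x.1 < y.1
  · simp [Prod.Lex.lt_iff, h1]
  · by_cases h2 : y.1 < x.1
    · simp [Prod.Lex.lt_iff, h1, h2]; omega
    · have he : x.1 = y.1 := le_antisymm (not_lt.1 h2) (not_lt.1 h1)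
      by_cases h3 : x.2 < y.2 <;> simp [Prod.Lex.lt_iff, h3, he]

-- the main invariant: folding the composite-key insertions over xs, starting from an
-- accumulator split into an under-part and an over-part, equals the two separate
-- stable sorts of the filtered halves appended.
theorem pv_fold_split (t : Int) (xs : List (Int × Int)) :
    ∀ (L R : List (Int × Int)), (∀ y ∈ L, y.1 ≤ t) → (∀ y ∈ R, ¬ y.1 ≤ t) →
    xs.foldl (fun acc x => PySem.List.insertBy
        (fun a b => decide (pvKey_condition_sort t a < pvKey_condition_sort t b)) x acc)
      (L ++ R)
    = (xs.filter (fun j => decide (j.1 ≤ t))).foldl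
        (fun acc x => PySem.List.insertBy (fun a b => decide (a.2 < b.2)) x acc) L
      ++ (xs.filter (fun j => !decide (j.1 ≤ t))).foldl
          (fun acc x => PySem.List.insertBy
            (fun a b => decide (a.1 < b.1) || !decide (b.1 < a.1) && decide (a.2 < b.2)) x acc) R := by
  induction xs with
  | nil => intro L R _ _; simp
  | cons x xs ih =>
    intro L R hL hR
    by_cases hx : x.1 ≤ t
    · have step : PySem.List.insertBy
          (fun a b => decide (pvKey_condition_sort t a < pvKey_condition_sort t b)) x (L ++ R)
          = PySem.List.insertBy (fun a b => decide (a.2 < b.2)) x L ++ R := by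
        rw [pv_insertBy_append_all_true _ _ _ _ (fun y hy => pv_key_uo hx (hR y hy)),
            pv_insertBy_congr _ (fun a b => decide (a.2 < b.2)) _ _ (fun y hy => pv_key_uu hx (hL y hy))]
      simp only [List.foldl_cons, List.filter_cons, hx, decide_true, Bool.not_true,
        Bool.false_eq_true, if_true, step]
      exact ih _ R (fun y hy => by
          rcases (PySem.List.mem_insertBy _ _ _ _).1 hy with h | h
          · exact h ▸ hx
          · exact hL y h) hR
    · have step : PySem.List.insertBy
          (fun a b => decide (pvKey_condition_sort t a < pvKey_condition_sort t b)) x (L ++ R)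
          = L ++ PySem.List.insertBy
              (fun a b => decide (a.1 < b.1) || !decide (b.1 < a.1) && decide (a.2 < b.2)) x R := by
        rw [pv_insertBy_append_all_false _ _ _ _ (fun y hy => pv_key_ou hx (hL y hy)),
            pv_insertBy_congr _ (fun a b => (decide (a.1 < b.1) || !decide (b.1 < a.1) && decide (a.2 < b.2))) _ _ (fun y hy => pv_key_oo hx (hR y hy))]
      simp only [List.foldl_cons, List.filter_cons, hx, decide_false, Bool.not_false,
        step]
      exact ih L _ hL (fun y hy => by
          rcases (PySem.List.mem_insertBy _ _ _ _).1 hy with h | h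
          · exact h ▸ hx
          · exact hR y h)

-- A's partition loop produces the two filters
theorem pv_partition (t : Int) (xs : List (Int × Int)) :
    ∀ (U O : List (Int × Int)),
    xs.foldl (fun (acc : List (Int × Int) × List (Int × Int)) job =>
        if job.1 ≤ t then (acc.1 ++ [job], acc.2) else (acc.1, acc.2 ++ [job])) (U, O)
    = (U ++ xs.filter (fun j => decide (j.1 ≤ t)), O ++ xs.filter (fun j => !decide (j.1 ≤ t))) := by
  induction xs with
  | nil => intro U O; simp
  | cons x xs ih =>
    intro U O
    by_cases hx : x.1 ≤ t <;>
      simp [hx, ih]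

-- ===== VERDICT (by name: the statement is the Claim_ definition above) =====
theorem condition_sort_spec : Claim_equal_condition_sort := by
  intro jobs t _
  unfold Spec_condition_sort condition_sort condition_sort_alt
  rw [pv_partition]
  simp only [List.nil_append]
  have := pv_fold_split t jobs [] []
    (by intro y hy; simp at hy) (by intro y hy; simp at hy)
  simp only [List.append_nil] at this
  simp only [PySem.List.sorted, PySem.List.sorted2, if_neg (by decide : ¬ (false = true))]
  exact this.symm
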